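-- pv_equiv track=rewrite | github.com/denisschmidt/leetcode | binarysearch/Double String Concatenation/py/main.py | solve
-- ===== SOURCE A (Python) =====
-- from functools import lru_cache
--
-- def solve(s):
--     @lru_cache(None)
--     def dfs(s1, s2):
--         if not s1 and not s2:
--             return 0
--         if not s1:
--             return len(s2)
--         if not s2:
--             return len(s1)
--
--         if s1[0] == s2[0]:
--             return dfs(s1[1:], s2[1:])
--
--         res = float('inf')
--
--         insert = dfs(s1, s2[1:]) + 1
--         delete = dfs(s1[1:], s2) + 1
--         replace = dfs(s1[1:], s2[1:]) + 1
--
--         return min(res, insert, delete, replace)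
--
--     if not s:
--         return 0
--
--     ans = float('inf')
--
--     for index in range(len(s)):
--         ans = min(ans, dfs(s[:index], s[index:]))
--
--     return ans
-- ===== SOURCE B (Python) =====
-- def solve(s):
--     n = len(s)
--     if n == 0:
--         return 0
--     best = n  # split at index 0: edit_distance("", s) == n
--     for i in range(1, n):
--         a, b = s[:i], s[i:]
--         m = len(b)
--         # suffix-indexed DP: row[j] = edit distance between current suffix of a and b[j:]
--         row = list(range(m, -1, -1))
--         for c in reversed(a):
--             new = [0] * (m + 1)
--             new[m] = row[m] + 1
--             for j in range(m - 1, -1, -1):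
--                 if c == b[j]:
--                     new[j] = row[j + 1]
--                 else:
--                     new[j] = 1 + min(row[j + 1], row[j], new[j + 1])
--             row = new
--         best = min(best, row[0])
--     return best
-- ===== Notes on version B (the rewrite author's own statement) =====
-- stated objective: faster
-- what changed: Replaced the lru_cache memoized recursion over string slices (string-keyed states, O(n) hashing per state, up to O(n^4) work) with an iterative two-row suffix-indexed edit-distance DP per split using only integer arrays, O(n^3) total and O(n) memory.
import Mathlib
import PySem

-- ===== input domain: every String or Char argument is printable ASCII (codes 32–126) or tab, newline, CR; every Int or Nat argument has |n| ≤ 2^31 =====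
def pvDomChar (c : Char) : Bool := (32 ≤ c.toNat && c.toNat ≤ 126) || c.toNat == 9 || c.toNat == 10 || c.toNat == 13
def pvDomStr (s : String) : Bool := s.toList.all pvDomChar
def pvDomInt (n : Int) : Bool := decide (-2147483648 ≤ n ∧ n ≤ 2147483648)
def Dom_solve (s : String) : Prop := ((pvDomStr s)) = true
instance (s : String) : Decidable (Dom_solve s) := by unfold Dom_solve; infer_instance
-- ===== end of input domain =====

-- B replaces A's memoized recursion on string slices by an iterative per-split edit-distance DP over integer rows.

-- ===== PORT A =====
-- A's dfs: memoized recursion; the memoization does not change the value, so the port is the plain recursion.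
-- min(res, insert, delete, replace) with res = inf is min(min(insert, delete), replace).
def dfsA : List Char → List Char → Int
  | [], [] => 0
  | [], s2 => ((s2.length : Nat) : Int)
  | s1, [] => ((s1.length : Nat) : Int)
  | a :: s1, b :: s2 =>
      if a = b then dfsA s1 s2
      else min (min (dfsA (a :: s1) s2 + 1) (dfsA s1 (b :: s2) + 1)) (dfsA s1 s2 + 1)
  termination_by s1 s2 => s1.length + s2.length
  decreasing_by all_goals simp <;> omega

-- ans starts at float('inf'), modelled as Option Int (none = inf, the identity of min);
-- the final getD 0 is unreachable since the loop is nonempty.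
def solve (s : String) : Int :=
  let l := s.toList
  if l.isEmpty then 0
  else
    (((List.range l.length).foldl
        (fun (ans : Option Int) i =>
          some (match ans with
                | none => dfsA (l.take i) (l.drop i)
                | some v => min v (dfsA (l.take i) (l.drop i)))) none)).getD 0

-- ===== PORT B =====
-- row = list(range(m, -1, -1)): row[j] = m - j, built by recursion on b.
def initRow : List Char → List Int
  | [] => [0]
  | _ :: t => (((t.length : Nat) : Int) + 1) :: initRow t

-- the inner descending j-loop, ported as structural recursion building the row right-to-left
def nextRow (c : Char) : List Char → List Int → List Int
  | d :: bt, p :: prest =>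
      let r := nextRow c bt prest
      (if c = d then prest.headD 0
       else 1 + min (min (prest.headD 0) p) (r.headD 0)) :: r
  | _, prev => [prev.headD 0 + 1]

-- edit distance between a and b (the `for c in reversed(a)` loop is foldr over a)
def levB (a b : List Char) : Int :=
  (List.foldr (fun c row => nextRow c b row) (initRow b) a).headD 0

def solve_alt (s : String) : Int :=
  let l := s.toList
  let n := l.length
  if n = 0 then 0
  else (List.range' 1 (n - 1)).foldl
        (fun best i => min best (levB (l.take i) (l.drop i))) ((n : Nat) : Int)

-- ===== PRECONDITION & SPEC =====
def Spec_solve (s : String) (out : Int) : Prop := out = solve_alt s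
instance (s : String) (out : Int) : Decidable (Spec_solve s out) := by unfold Spec_solve; infer_instance

-- ===== CLAIM (what is proved, stated in full; the proofs are below) =====
def Claim_equal_solve : Prop := ∀ (s : String), Dom_solve s → Spec_solve s (solve s)

-- ===== LEMMAS AND PROOFS =====

theorem dfsA_nil_left (b : List Char) : dfsA [] b = ((b.length : Nat) : Int) := by
  cases b <;> simp [dfsA]

theorem dfsA_nil_right (a : List Char) : dfsA a [] = ((a.length : Nat) : Int) := by
  cases a <;> simp [dfsA]

-- the intended content of a row: entry j is dfsA a (b.drop j)
def rowSpec (a : List Char) : List Char → List Int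
  | [] => [dfsA a []]
  | d :: t => dfsA a (d :: t) :: rowSpec a t

theorem rowSpec_headD (a b : List Char) : (rowSpec a b).headD 0 = dfsA a b := by
  cases b <;> rfl

theorem initRow_eq (b : List Char) : initRow b = rowSpec [] b := by
  induction b with
  | nil => simp [initRow, rowSpec, dfsA]
  | cons d t ih => simp [initRow, rowSpec, ih, dfsA_nil_left]

theorem nextRow_rowSpec (c : Char) (b a : List Char) :
    nextRow c b (rowSpec a b) = rowSpec (c :: a) b := by
  induction b with
  | nil =>
      simp [rowSpec, nextRow, dfsA_nil_right]
  | cons d t ih =>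
      simp only [rowSpec, nextRow, ih, rowSpec_headD]
      congr 1
      by_cases h : c = d
      · simp [h, dfsA]
      · simp only [dfsA, if_neg h]
        omega

theorem foldr_nextRow (b a : List Char) :
    List.foldr (fun c row => nextRow c b row) (initRow b) a = rowSpec a b := by
  induction a with
  | nil => exact initRow_eq b
  | cons c t ih => simp [List.foldr, ih, nextRow_rowSpec]

theorem levB_eq (a b : List Char) : levB a b = dfsA a b := by
  simp only [levB, foldr_nextRow]
  exact rowSpec_headD a b

-- folding A's Option-valued min from `some v` is a plain Int min fold
theorem optfold (f : Nat → Int) (is : List Nat) : ∀ (v : Int),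
    is.foldl (fun (ans : Option Int) i =>
        some (match ans with
              | none => f i
              | some w => min w (f i))) (some v)
      = some (is.foldl (fun w i => min w (f i)) v) := by
  induction is with
  | nil => intro v; rfl
  | cons i t ih => intro v; simpa using ih (min v (f i))

theorem foldl_min_congr (f g : Nat → Int) (h : ∀ i, f i = g i) (is : List Nat) (v : Int) :
    is.foldl (fun w i => min w (f i)) v = is.foldl (fun w i => min w (g i)) v := by
  induction is generalizing v with
  | nil => rfl
  | cons i t _ => simp [h]

-- ===== VERDICT (by name: the statement is the Claim_ definition above) =====
theorem solve_spec : Claim_equal_solve := by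
  intro s _
  unfold Spec_solve solve solve_alt
  cases hl : s.toList with
  | nil => simp
  | cons x t =>
      simp only [List.isEmpty_cons, Bool.false_eq_true, if_false, List.length_cons,
        Nat.succ_ne_zero, Nat.add_sub_cancel]
      have hrange : List.range (t.length + 1) = 0 :: List.range' 1 t.length := by
        rw [List.range_eq_range']
        rfl
      rw [hrange]
      simp only [List.foldl_cons, List.take_zero, List.drop_zero, dfsA_nil_left]
      rw [optfold (fun i => dfsA ((x :: t).take i) ((x :: t).drop i)) (List.range' 1 t.length)]
      simp only [Option.getD_some]
      rw [foldl_min_congr _ _ (fun i => (levB_eq ((x :: t).take i) ((x :: t).drop i)).symm)]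
      simp
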